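-- pv_equiv track=rewrite | github.com/RuanVitorr/atividades-de-Computabilidade-e-Complexidade-de-Algortimos | att08.py | afn_zeros_divisivel_por_3
-- ===== SOURCE A (Python) =====
-- def afn_zeros_divisivel_por_3(palavra):
--     estado = 'q0'  # Começa no estado q0
--
--     for char in palavra:
--         if estado == 'q0':
--             if char == '0':
--                 estado = 'q1'
--             elif char == '1':
--                 estado = 'q0'
--             else:
--                 return 'palavra invalida (caractere inválido)'
--         elif estado == 'q1':
--             if char == '0':
--                 estado = 'q2'
--             elif char == '1':
--                 estado = 'q1'
--             else:
--                 return 'palavra invalida (caractere inválido)'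
--         elif estado == 'q2':
--             if char == '0':
--                 estado = 'q0'
--             elif char == '1':
--                 estado = 'q2'
--             else:
--                 return 'palavra invalida (caractere inválido)'
--
--     if estado == 'q0':
--         return "palavra valida (número de '0's é divisível por 3)"
--     else:
--         return "palavra invalida (número de '0's não é divisível por 3)"
-- ===== SOURCE B (Python) =====
-- def afn_zeros_divisivel_por_3(palavra):
--     count = 0
--     for char in palavra:
--         if char == '0':
--             count += 1
--         elif char != '1':
--             return 'palavra invalida (caractere inválido)'
--     if count % 3 == 0:
--         return "palavra valida (número de '0's é divisível por 3)"
--     return "palavra invalida (número de '0's não é divisível por 3)"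
-- ===== Notes on version B (the rewrite author's own statement) =====
-- stated objective: simpler
-- what changed: Replaces the three-state symbolic DFA (string-state transition table) by a single integer zero-counter with a final modulo-3 test, flattening the control flow.
import Mathlib
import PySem

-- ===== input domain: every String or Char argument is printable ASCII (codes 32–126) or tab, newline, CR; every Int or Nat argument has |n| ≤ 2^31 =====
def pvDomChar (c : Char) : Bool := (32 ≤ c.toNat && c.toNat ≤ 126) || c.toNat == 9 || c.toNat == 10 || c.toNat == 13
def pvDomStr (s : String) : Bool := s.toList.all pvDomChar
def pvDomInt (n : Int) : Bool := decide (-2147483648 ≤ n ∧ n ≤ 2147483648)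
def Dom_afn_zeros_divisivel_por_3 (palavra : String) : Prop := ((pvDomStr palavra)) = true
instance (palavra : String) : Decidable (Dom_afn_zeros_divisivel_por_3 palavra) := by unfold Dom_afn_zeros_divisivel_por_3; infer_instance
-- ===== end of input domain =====

-- B replaces A's three-state symbolic DFA by an integer zero-counter with a final modulo-3 test (simpler, same cost).

-- ===== PORT A =====
-- A's for-loop over the word, threading the state string 'estado'; each branch mirrors A's code in order.
def pvLoopA : List Char → String → String
  | [], estado =>
    if estado = "q0" then "palavra valida (número de '0's é divisível por 3)"
    else "palavra invalida (número de '0's não é divisível por 3)"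
  | c :: rest, estado =>
    if estado = "q0" then
      if c = '0' then pvLoopA rest "q1"
      else if c = '1' then pvLoopA rest "q0"
      else "palavra invalida (caractere inválido)"
    else if estado = "q1" then
      if c = '0' then pvLoopA rest "q2"
      else if c = '1' then pvLoopA rest "q1"
      else "palavra invalida (caractere inválido)"
    else if estado = "q2" then
      if c = '0' then pvLoopA rest "q0"
      else if c = '1' then pvLoopA rest "q2"
      else "palavra invalida (caractere inválido)"
    else pvLoopA rest estado

def afn_zeros_divisivel_por_3 (palavra : String) : String :=
  pvLoopA palavra.toList "q0"

-- ===== PORT B =====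
-- B's for-loop: count zeros, early-return on an invalid character, final modulo test.
def pvLoopB : List Char → Int → String
  | [], count =>
    if count % 3 = 0 then "palavra valida (número de '0's é divisível por 3)"
    else "palavra invalida (número de '0's não é divisível por 3)"
  | c :: rest, count =>
    if c = '0' then pvLoopB rest (count + 1)
    else if c ≠ '1' then "palavra invalida (caractere inválido)"
    else pvLoopB rest count

def afn_zeros_divisivel_por_3_alt (palavra : String) : String :=
  pvLoopB palavra.toList 0

-- ===== PRECONDITION & SPEC =====
def Spec_afn_zeros_divisivel_por_3 (palavra : String) (out : String) : Prop := out = afn_zeros_divisivel_por_3_alt palavra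
instance (palavra : String) (out : String) : Decidable (Spec_afn_zeros_divisivel_por_3 palavra out) := by unfold Spec_afn_zeros_divisivel_por_3; infer_instance

-- ===== CLAIM (what is proved, stated in full; the proofs are below) =====
def Claim_equal_afn_zeros_divisivel_por_3 : Prop := ∀ (palavra : String), Dom_afn_zeros_divisivel_por_3 palavra → Spec_afn_zeros_divisivel_por_3 palavra (afn_zeros_divisivel_por_3 palavra)

-- ===== LEMMAS AND PROOFS =====

-- the DFA state corresponding to a zero-count residue
def pvStateOf (m : Int) : String :=
  if m = 0 then "q0" else if m = 1 then "q1" else "q2"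

-- loop invariant: A's state equals the residue of B's counter
theorem pvLoop_eq (l : List Char) : ∀ (count : Int),
    pvLoopA l (pvStateOf (count % 3)) = pvLoopB l count := by
  induction l with
  | nil =>
    intro count
    have h : count % 3 = 0 ∨ count % 3 = 1 ∨ count % 3 = 2 := by omega
    rcases h with h | h | h <;> simp [pvLoopA, pvLoopB, pvStateOf, h]
  | cons c rest ih =>
    intro count
    have h : count % 3 = 0 ∨ count % 3 = 1 ∨ count % 3 = 2 := by omega
    by_cases h0 : c = '0'
    · have hA := ih (count + 1)
      rcases h with h | h | h
      · have h2 : (count + 1) % 3 = 1 := by omega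
        rw [h2] at hA
        simpa [pvLoopA, pvLoopB, pvStateOf, h, h0] using hA
      · have h2 : (count + 1) % 3 = 2 := by omega
        rw [h2] at hA
        simpa [pvLoopA, pvLoopB, pvStateOf, h, h0] using hA
      · have h2 : (count + 1) % 3 = 0 := by omega
        rw [h2] at hA
        simpa [pvLoopA, pvLoopB, pvStateOf, h, h0] using hA
    · by_cases h1 : c = '1'
      · have hA := ih count
        rcases h with h | h | h <;> rw [h] at hA <;>
          simpa [pvLoopA, pvLoopB, pvStateOf, h, h0, h1] using hA
      · rcases h with h | h | h <;>
          simp [pvLoopA, pvLoopB, pvStateOf, h, h0, h1]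

-- ===== VERDICT (by name: the statement is the Claim_ definition above) =====
theorem afn_zeros_divisivel_por_3_spec : Claim_equal_afn_zeros_divisivel_por_3 := by
  intro palavra _
  unfold Spec_afn_zeros_divisivel_por_3 afn_zeros_divisivel_por_3 afn_zeros_divisivel_por_3_alt
  have := pvLoop_eq palavra.toList 0
  simpa [pvStateOf] using this
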